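-- pv_equiv track=rewrite | github.com/dsaraujo/duality | cards.py | add_spell_magnitude
-- ===== SOURCE A (Python) =====
-- def add_spell_magnitude(base, num):
--     # Convert to an integer if it's a string
--     base = int(base)
--
--     if num == 0:
--         return base
--
--     if num > 0:
--         if base + num <= 5:
--             return base + num
--         else:
--             res = base
--             while num > 0:
--                 if res < 5:
--                     res += 1
--                 else:
--                     res += 5
--                 num -= 1
--             return res
--
--     else:  # num < 0
--         if base + num <= 1:
--             return base + num
--         else:
--             res = base
--             while num < 0:
--                 if res <= 5:
--                     res -= 1
--                 else:
--                     res -= 5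
--                 num += 1
--             return res
-- ===== SOURCE B (Python) =====
-- def add_spell_magnitude(base, num):
--     # Closed-form arithmetic instead of A's per-step loop (O(1) vs O(|num|)).
--     base = int(base)
--     if num == 0:
--         return base
--     if num > 0:
--         if base + num <= 5:
--             return base + num
--         if base >= 5:
--             return base + 5 * num
--         # climb by 1 to reach 5 (5-base steps), then by 5 for the rest
--         return 5 + 5 * (num - (5 - base))
--     else:
--         if base + num <= 1:
--             return base + num
--         if base <= 5:
--             return base + num
--         m = -num
--         t = (base - 1) // 5  # number of -5 steps before dropping to <= 5
--         if m <= t: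
--             return base - 5 * m
--         return base - 5 * t - (m - t)
-- ===== Notes on version B (the rewrite author's own statement) =====
-- stated objective: faster
-- what changed: Replaced A's per-step while loops (one iteration per unit of |num|) with closed-form arithmetic: climb-by-1 steps to the threshold 5 are counted directly and the remaining steps contribute 5 each (for decreases, the number of -5 steps is computed by one floor division).
import Mathlib
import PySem

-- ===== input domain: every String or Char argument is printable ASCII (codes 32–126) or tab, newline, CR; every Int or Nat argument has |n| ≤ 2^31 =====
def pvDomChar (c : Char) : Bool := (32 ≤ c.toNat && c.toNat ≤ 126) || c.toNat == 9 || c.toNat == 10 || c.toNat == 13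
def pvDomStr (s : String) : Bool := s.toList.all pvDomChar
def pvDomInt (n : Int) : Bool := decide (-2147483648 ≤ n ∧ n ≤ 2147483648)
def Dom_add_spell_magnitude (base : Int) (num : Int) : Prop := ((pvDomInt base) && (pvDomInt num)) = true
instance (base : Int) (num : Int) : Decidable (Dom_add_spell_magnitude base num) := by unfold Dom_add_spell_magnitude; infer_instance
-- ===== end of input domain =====

-- B replaces A's per-step while loops by closed-form arithmetic (objective: faster, O(1) vs O(|num|)).

-- ===== PORT A =====
-- while num > 0: if res < 5: res += 1 else: res += 5; num -= 1
def pvLoopPosA (res num : Int) : Int :=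
  if 0 < num then pvLoopPosA (if res < 5 then res + 1 else res + 5) (num - 1) else res
termination_by num.toNat
decreasing_by omega

-- while num < 0: if res <= 5: res -= 1 else: res -= 5; num += 1
def pvLoopNegA (res num : Int) : Int :=
  if num < 0 then pvLoopNegA (if res ≤ 5 then res - 1 else res - 5) (num + 1) else res
termination_by (-num).toNat
decreasing_by omega

def add_spell_magnitude (base : Int) (num : Int) : Int :=
  -- base = int(base) is the identity on an int argument
  if num = 0 then base
  else if 0 < num then
    if base + num ≤ 5 then base + num else pvLoopPosA base num
  else
    if base + num ≤ 1 then base + num else pvLoopNegA base num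

-- ===== PORT B =====
def add_spell_magnitude_alt (base : Int) (num : Int) : Int :=
  if num = 0 then base
  else if 0 < num then
    if base + num ≤ 5 then base + num
    else if 5 ≤ base then base + 5 * num
    else 5 + 5 * (num - (5 - base))
  else
    if base + num ≤ 1 then base + num
    else if base ≤ 5 then base + num
    else
      let m := -num
      let t := PySem.Int.floordiv (base - 1) 5
      if m ≤ t then base - 5 * m
      else base - 5 * t - (m - t)

-- ===== PRECONDITION & SPEC =====
def Spec_add_spell_magnitude (base : Int) (num : Int) (out : Int) : Prop := out = add_spell_magnitude_alt base num
instance (base : Int) (num : Int) (out : Int) : Decidable (Spec_add_spell_magnitude base num out) := by unfold Spec_add_spell_magnitude; infer_instance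

-- ===== CLAIM (what is proved, stated in full; the proofs are below) =====
def Claim_equal_add_spell_magnitude : Prop := ∀ (base : Int) (num : Int), Dom_add_spell_magnitude base num → Spec_add_spell_magnitude base num (add_spell_magnitude base num)

-- ===== LEMMAS AND PROOFS =====

-- A's positive loop, run m times, in closed form.
theorem pvLoopPosA_eq (m : Nat) : ∀ res : Int,
    pvLoopPosA res (m : Int) =
      if 5 ≤ res then res + 5 * m
      else if (m : Int) ≤ 5 - res then res + m
      else 5 + 5 * ((m : Int) - (5 - res)) := by
  induction m with
  | zero => intro res; rw [pvLoopPosA]; simp; omega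
  | succ n ih =>
    intro res
    rw [pvLoopPosA]
    rw [if_pos (by push_cast; omega)]
    have h1 : ((n + 1 : Nat) : Int) - 1 = (n : Int) := by push_cast; omega
    rw [h1, ih]
    split_ifs <;> push_cast at * <;> omega

-- A's negative loop, run m times, in closed form.
theorem pvLoopNegA_eq (m : Nat) : ∀ res : Int,
    pvLoopNegA res (-(m : Int)) =
      if res ≤ 5 then res - m
      else if (m : Int) ≤ (res - 1) / 5 then res - 5 * m
      else res - 5 * ((res - 1) / 5) - ((m : Int) - (res - 1) / 5) := by
  induction m with
  | zero => intro res; rw [pvLoopNegA]; simp; omega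
  | succ n ih =>
    intro res
    rw [pvLoopNegA]
    rw [if_pos (by push_cast; omega)]
    have h1 : -((n + 1 : Nat) : Int) + 1 = -(n : Int) := by push_cast; omega
    rw [h1, ih]
    split_ifs <;> push_cast at * <;> omega

-- ===== VERDICT (by name: the statement is the Claim_ definition above) =====
theorem add_spell_magnitude_spec : Claim_equal_add_spell_magnitude := by
  intro base num _
  unfold Spec_add_spell_magnitude add_spell_magnitude add_spell_magnitude_alt
  rcases eq_or_ne num 0 with h0 | h0
  · simp [h0]
  rcases Int.lt_or_lt_of_ne h0 with hneg | hpos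
  · -- num < 0
    have hnp : ¬ 0 < num := by omega
    simp only [if_neg h0, if_neg hnp]
    by_cases hb : base + num ≤ 1
    · simp only [if_pos hb]
    · simp only [if_neg hb]
      obtain ⟨m, hm⟩ : ∃ m : Nat, num = -(m : Int) := ⟨num.natAbs, by omega⟩
      subst hm
      rw [pvLoopNegA_eq]
      have hfd : PySem.Int.floordiv (base - 1) 5 = (base - 1) / 5 :=
        PySem.Int.floordiv_eq_ediv_of_pos (by omega)
      simp only [hfd, neg_neg]
      split_ifs <;> omega
  · -- num > 0
    simp only [if_neg h0, if_pos hpos]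
    by_cases hb : base + num ≤ 5
    · simp only [if_pos hb]
    · simp only [if_neg hb]
      obtain ⟨m, hm⟩ : ∃ m : Nat, num = (m : Int) := ⟨num.toNat, by omega⟩
      subst hm
      rw [pvLoopPosA_eq]
      split_ifs <;> omega
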